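-- pv_equiv track=rewrite | github.com/Jiahao039/CogNav_Personal_Learning | detection/groundedsam.py | process_tag_classes
-- ===== SOURCE A (Python) =====
-- from typing import Any, List
-- from typing import Union, List, Dict
--
-- def process_tag_classes(text_prompt:str, add_classes:List[str]=[], remove_classes:List[str]=[]) -> List[str]:
--     '''
--     Convert a text prompt from Tag2Text to a list of classes.
--     '''
--     classes = text_prompt.split(',')
--     classes = [obj_class.strip() for obj_class in classes]
--     classes = [obj_class for obj_class in classes if obj_class != '']
--
--     for c in add_classes:
--         if c not in classes:
--             classes.append(c)
--
--     for c in remove_classes: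
--         classes = [obj_class for obj_class in classes if c not in obj_class.lower()]
--
--     return classes
-- ===== SOURCE B (Python) =====
-- from typing import List
--
-- def process_tag_classes(text_prompt: str, add_classes: List[str] = [], remove_classes: List[str] = []) -> List[str]:
--     # keep(s): s survives iff no remove substring occurs in its lowercased form
--     def keep(s):
--         low = s.lower()
--         return not any(sub in low for sub in remove_classes)
--     base = [s for s in (p.strip() for p in text_prompt.split(',')) if s]
--     out = [s for s in base if keep(s)]
--     seen = set(base)
--     for c in add_classes:
--         if c not in seen:
--             seen.add(c)
--             if keep(c):
--                 out.append(c)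
--     return out
-- ===== Notes on version B (the rewrite author's own statement) =====
-- stated objective: faster
-- what changed: Instead of extending the list and then rebuilding it once per remove class, B applies the removal predicate once per element up front and handles add_classes in one pass with a seen-set, appending only deduplicated adds absent from the base that survive removal (correct because A appends an add iff it is not in base nor an earlier add, and the stable filters commute with the appends).
import Mathlib
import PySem

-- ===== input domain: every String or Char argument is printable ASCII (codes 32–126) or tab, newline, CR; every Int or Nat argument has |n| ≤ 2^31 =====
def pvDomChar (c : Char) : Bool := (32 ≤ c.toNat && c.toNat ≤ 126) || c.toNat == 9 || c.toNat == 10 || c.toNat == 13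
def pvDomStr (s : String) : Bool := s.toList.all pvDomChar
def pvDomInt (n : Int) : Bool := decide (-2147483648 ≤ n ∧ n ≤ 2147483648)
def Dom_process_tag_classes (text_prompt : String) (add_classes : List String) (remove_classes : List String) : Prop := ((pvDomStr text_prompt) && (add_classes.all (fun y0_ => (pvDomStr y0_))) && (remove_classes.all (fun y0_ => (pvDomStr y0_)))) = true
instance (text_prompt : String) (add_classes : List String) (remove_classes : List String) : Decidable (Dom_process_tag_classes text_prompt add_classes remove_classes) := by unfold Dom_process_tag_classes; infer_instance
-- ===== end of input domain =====

-- ===== PORT A =====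
-- B filters once per element up front and handles adds in one seen-set pass instead of A's repeated list rebuilds and per-add list scans (objective: faster, measured constant-factor).
def process_tag_classes (text_prompt : String) (add_classes : List String) (remove_classes : List String) : List String :=
  let classes := ((PySem.Str.split? text_prompt ",").getD [])
  let classes := classes.map (fun obj_class => PySem.Str.strip obj_class)
  let classes := classes.filter (fun obj_class => obj_class != "")
  let classes := add_classes.foldl (fun classes c =>
    if classes.contains c then classes else classes ++ [c]) classes
  remove_classes.foldl (fun classes c =>
    classes.filter (fun obj_class => !PySem.Str.isIn c (PySem.Str.lower obj_class))) classes

-- ===== PORT B =====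
-- B's keep(s): s survives iff no remove substring occurs in its lowercased form
def ptcKeep (remove_classes : List String) (s : String) : Bool :=
  let low := PySem.Str.lower s
  !(remove_classes.any (fun sub => PySem.Str.isIn sub low))

def process_tag_classes_alt (text_prompt : String) (add_classes : List String) (remove_classes : List String) : List String :=
  let base := (((PySem.Str.split? text_prompt ",").getD []).map
      (fun p => PySem.Str.strip p)).filter (fun s => s != "")
  let out := base.filter (ptcKeep remove_classes)
  let seen : PySem.Set String := PySem.Set.ofList base
  (add_classes.foldl (fun (st : List String × PySem.Set String) c =>
    if PySem.Set.contains st.2 c then st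
    else ((if ptcKeep remove_classes c then st.1 ++ [c] else st.1), PySem.Set.add st.2 c))
    (out, seen)).1

-- ===== PRECONDITION & SPEC =====
def Spec_process_tag_classes (text_prompt : String) (add_classes : List String) (remove_classes : List String) (out : List String) : Prop := out = process_tag_classes_alt text_prompt add_classes remove_classes
instance (text_prompt : String) (add_classes : List String) (remove_classes : List String) (out : List String) : Decidable (Spec_process_tag_classes text_prompt add_classes remove_classes out) := by unfold Spec_process_tag_classes; infer_instance

-- ===== CLAIM (what is proved, stated in full; the proofs are below) =====
def Claim_equal_process_tag_classes : Prop := ∀ (text_prompt : String) (add_classes : List String) (remove_classes : List String), Dom_process_tag_classes text_prompt add_classes remove_classes → Spec_process_tag_classes text_prompt add_classes remove_classes (process_tag_classes text_prompt add_classes remove_classes)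

-- ===== LEMMAS AND PROOFS =====

-- A's fold of filters is one filter over the conjunction of the predicates
theorem foldl_filter_eq_filter_all {α β : Type} (p : β → α → Bool) :
    ∀ (rs : List β) (cs : List α),
      rs.foldl (fun cs c => cs.filter (fun x => p c x)) cs
        = cs.filter (fun x => rs.all (fun c => p c x)) := by
  intro rs
  induction rs with
  | nil => intro cs; simp
  | cons c rest ih =>
    intro cs
    simp only [List.foldl_cons, ih, List.filter_filter, List.all_cons]
    apply List.filter_congr
    intro x _
    exact Bool.and_comm _ _

-- B's seen-set add loop computes the filtered version of A's append loop
theorem add_loop_eq (keep : String → Bool) :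
    ∀ (adds cs : List String) (seen : PySem.Set String) (out : List String),
      (∀ x, PySem.Set.contains seen x = cs.contains x) →
      out = cs.filter keep →
      (adds.foldl (fun (st : List String × PySem.Set String) c =>
          if PySem.Set.contains st.2 c then st
          else ((if keep c then st.1 ++ [c] else st.1), PySem.Set.add st.2 c))
        (out, seen)).1
      = (adds.foldl (fun classes c =>
          if classes.contains c then classes else classes ++ [c]) cs).filter keep := by
  intro adds
  induction adds with
  | nil => intro cs seen out hmem hout; simpa using hout
  | cons c rest ih =>
    intro cs seen out hmem hout
    simp only [List.foldl_cons, hmem c]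
    by_cases h : cs.contains c = true
    · simp only [h, if_true]
      exact ih cs seen out hmem hout
    · have hf : cs.contains c = false := by simpa using h
      simp only [hf, Bool.false_eq_true, if_false]
      apply ih (cs ++ [c]) (PySem.Set.add seen c)
      · intro x
        have hc : c ∉ seen := by
          have := (hmem c).trans hf
          simpa using this
        have h2 : (x ∈ seen) ↔ (x ∈ cs) := by
          have := hmem x
          simpa using this
        simp [PySem.Set.add, PySem.Set.contains, hc, List.mem_append, h2]
      · rw [List.filter_append, hout]
        by_cases hk : keep c = true <;> simp [hk]

theorem process_tag_classes_spec : Claim_equal_process_tag_classes := by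
  intro tp add rem _
  unfold Spec_process_tag_classes process_tag_classes process_tag_classes_alt
  rw [foldl_filter_eq_filter_all]
  rw [add_loop_eq (ptcKeep rem) add _ _ _
      (fun x => by simp [PySem.Set.contains, PySem.Set.mem_ofList])
      rfl]
  apply List.filter_congr
  intro x _
  simp [ptcKeep, List.not_any_eq_all_not]
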